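-- pv_equiv track=rewrite | github.com/pypi-data/pypi-mirror-332 | packages/docgen-cli/docgen_cli-1.0.7-cp39-cp39-macosx_10_9_universal2.whl/docgen/generators/docstring_generator.py | _generate_description
-- ===== SOURCE A (Python) =====
-- def _generate_description(name: str) -> str:
--     words = []
--     current_word = ""
--
--     for char in name:
--         if char.isupper() and current_word:
--             words.append(current_word)
--             current_word = char
--         elif char == "_":
--             if current_word:
--                 words.append(current_word)
--             current_word = ""
--         else:
--             current_word += char
--
--     if current_word:
--         words.append(current_word)
--
--     description = " ".join(word.lower() for word in words)
--     return description.capitalize() + "."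
-- ===== SOURCE B (Python) =====
-- def _generate_description(name: str) -> str:
--     # Scan the name right-to-left, building words back-to-front:
--     # an uppercase char closes the word it starts, '_' ends a word without joining it.
--     rev_words = []
--     buf = []  # chars of the current word, in reverse order
--     for ch in reversed(name):
--         if ch == "_":
--             if buf:
--                 rev_words.append("".join(reversed(buf)))
--             buf = []
--         else:
--             buf.append(ch)
--             if ch.isupper():
--                 rev_words.append("".join(reversed(buf)))
--                 buf = []
--     if buf:
--         rev_words.append("".join(reversed(buf)))
--     words = rev_words[::-1]
--     return " ".join(word.lower() for word in words).capitalize() + "."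
-- ===== Notes on version B (the rewrite author's own statement) =====
-- stated objective: alternative
-- what changed: B scans the name right-to-left, building words back-to-front (an uppercase char closes the word it starts, '_' ends a word), then reverses the word list, instead of A's left-to-right accumulator loop.
import Mathlib
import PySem

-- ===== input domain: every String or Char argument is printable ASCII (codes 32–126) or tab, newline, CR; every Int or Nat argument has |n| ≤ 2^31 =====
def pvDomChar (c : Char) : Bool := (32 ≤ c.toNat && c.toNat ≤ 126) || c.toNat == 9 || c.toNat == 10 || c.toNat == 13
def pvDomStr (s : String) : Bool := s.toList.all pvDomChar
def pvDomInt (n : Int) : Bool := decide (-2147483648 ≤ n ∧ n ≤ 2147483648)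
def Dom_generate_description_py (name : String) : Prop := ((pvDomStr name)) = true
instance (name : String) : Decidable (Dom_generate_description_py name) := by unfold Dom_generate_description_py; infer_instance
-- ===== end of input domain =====

-- B scans the name right-to-left building the word list back-to-front; same result, different traversal (objective: alternative).

-- ===== PORT A =====
-- str.capitalize(): first char upper, rest lower — exact on the ASCII domain.
def pyCapitalize (cs : List Char) : List Char :=
  match cs with
  | [] => []
  | c :: t => PySem.Chars.upperChar c :: PySem.Chars.lower t

def aStep (st : List (List Char) × List Char) (c : Char) : List (List Char) × List Char :=
  if PySem.Chars.isupper c && !st.2.isEmpty then (st.1 ++ [st.2], [c])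
  else if c == '_' then ((if st.2.isEmpty then st.1 else st.1 ++ [st.2]), [])
  else (st.1, st.2 ++ [c])

def generate_description_py (name : String) : String :=
  let st := name.toList.foldl aStep ([], [])
  let words := if st.2.isEmpty then st.1 else st.1 ++ [st.2]
  let description := PySem.Chars.join [' '] (words.map PySem.Chars.lower)
  String.ofList (pyCapitalize description ++ ['.'])

-- ===== PORT B =====
def bStep (c : Char) (st : List (List Char) × List Char) : List (List Char) × List Char :=
  if c == '_' then ((if st.2.isEmpty then st.1 else st.1 ++ [st.2.reverse]), [])
  else
    let buf := st.2 ++ [c]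
    if PySem.Chars.isupper c then (st.1 ++ [buf.reverse], []) else (st.1, buf)

def generate_description_py_alt (name : String) : String :=
  -- 'for ch in reversed(name)' = a left fold over the reversed char list
  let st := name.toList.reverse.foldl (fun s c => bStep c s) ([], [])
  let rev_words := if st.2.isEmpty then st.1 else st.1 ++ [st.2.reverse]
  let words := rev_words.reverse
  String.ofList (pyCapitalize (PySem.Chars.join [' '] (words.map PySem.Chars.lower)) ++ ['.'])

-- ===== PRECONDITION & SPEC =====
def Spec_generate_description_py (name : String) (out : String) : Prop := out = generate_description_py_alt name
instance (name : String) (out : String) : Decidable (Spec_generate_description_py name out) := by unfold Spec_generate_description_py; infer_instance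

-- ===== CLAIM (what is proved, stated in full; the proofs are below) =====
def Claim_equal_generate_description_py : Prop := ∀ (name : String), Dom_generate_description_py name → Spec_generate_description_py name (generate_description_py name)

-- ===== LEMMAS AND PROOFS =====

-- Reference word-splitting function (A's loop read as a recursion on the remaining chars).
def wfrom (cur cs : List Char) : List (List Char) :=
  match cs with
  | [] => if cur.isEmpty then [] else [cur]
  | c :: t =>
    if PySem.Chars.isupper c && !cur.isEmpty then cur :: wfrom [c] t
    else if c == '_' then (if cur.isEmpty then [] else [cur]) ++ wfrom [] t
    else wfrom (cur ++ [c]) t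

def wpred (c : Char) : Bool := !(c == '_') && !(PySem.Chars.isupper c)

def wtail (cs : List Char) : List (List Char) :=
  wfrom [] (cs.drop (cs.takeWhile wpred).length)

def finA (st : List (List Char) × List Char) : List (List Char) :=
  if st.2.isEmpty then st.1 else st.1 ++ [st.2]

lemma aFold_eq : ∀ (cs : List Char) (ws : List (List Char)) (cur : List Char),
    finA (cs.foldl aStep (ws, cur)) = ws ++ wfrom cur cs := by
  intro cs
  induction cs with
  | nil =>
    intro ws cur
    simp only [List.foldl_nil, wfrom, finA]
    by_cases h : cur.isEmpty <;> simp [h]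
  | cons c t ih =>
    intro ws cur
    simp only [List.foldl_cons, aStep]
    by_cases h1 : (PySem.Chars.isupper c && !cur.isEmpty) = true
    · rw [if_pos h1, ih]
      conv_rhs => rw [wfrom]
      rw [if_pos h1]
      simp
    · by_cases h2 : (c == '_') = true
      · rw [if_neg h1, if_pos h2, ih]
        conv_rhs => rw [wfrom]
        rw [if_neg h1, if_pos h2]
        by_cases h3 : cur.isEmpty <;> simp [h3]
      · rw [if_neg h1, if_neg h2, ih]
        conv_rhs => rw [wfrom]
        rw [if_neg h1, if_neg h2]

lemma wtail_cons_pos (c : Char) (cs : List Char) (h : wpred c = true) :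
    wtail (c :: cs) = wtail cs := by
  rw [wtail, wtail, List.takeWhile_cons_of_pos h, List.length_cons, List.drop_succ_cons]

lemma wtail_cons_neg (c : Char) (cs : List Char) (h : wpred c = false) :
    wtail (c :: cs) = wfrom [] (c :: cs) := by
  rw [wtail, List.takeWhile_cons_of_neg (by simp [h]), List.length_nil, List.drop_zero]

lemma wfrom_nil_cons (c : Char) (t : List Char) (h2 : (c == '_') = false) :
    wfrom [] (c :: t) = wfrom [c] t := by
  rw [wfrom, if_neg (by simp), if_neg (by simp [h2]), List.nil_append]

lemma wfrom_nil_underscore (t : List Char) : wfrom [] ('_' :: t) = wfrom [] t := by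
  rw [wfrom, if_neg (by simp), if_pos (by decide)]
  simp

lemma wfrom_ne : ∀ (cs cur : List Char), cur ≠ [] →
    wfrom cur cs = (cur ++ cs.takeWhile wpred) :: wtail cs := by
  intro cs
  induction cs with
  | nil =>
    intro cur h
    simp [wfrom, wtail, List.isEmpty_iff, h]
  | cons c t ih =>
    intro cur h
    have hcur : cur.isEmpty = false := by simp [h]
    by_cases hu : PySem.Chars.isupper c = true
    · have hw : wpred c = false := by simp [wpred, hu]
      have h2 : (c == '_') = false := by
        rcases eq_or_ne c '_' with rfl | hne
        · exact absurd hu (by decide)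
        · simp [hne]
      rw [wfrom, if_pos (by simp [hu, hcur]), List.takeWhile_cons_of_neg (by simp [hw]),
        wtail_cons_neg c t hw, wfrom_nil_cons c t h2]
      simp
    · by_cases h2 : (c == '_') = true
      · have e : c = '_' := by simpa using h2
        subst e
        have hw : wpred '_' = false := by decide
        rw [wfrom, if_neg (by simp [hu]), if_pos (by decide),
          List.takeWhile_cons_of_neg (by simp [hw]), wtail_cons_neg _ t hw,
          wfrom_nil_underscore t]
        simp [hcur]
      · have hw : wpred c = true := by simp [wpred, h2, hu]
        rw [wfrom, if_neg (by simp [hu]), if_neg h2, ih (cur ++ [c]) (by simp),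
          List.takeWhile_cons_of_pos hw, wtail_cons_pos c t hw]
        simp

lemma wfrom_nil_eq (cs : List Char) :
    wfrom [] cs = if (cs.takeWhile wpred).isEmpty then wtail cs
                  else cs.takeWhile wpred :: wtail cs := by
  cases cs with
  | nil => simp [wfrom, wtail]
  | cons c t =>
    by_cases hw : wpred c = true
    · have h2 : (c == '_') = false := by
        have := hw; unfold wpred at this
        rcases (Bool.and_eq_true _ _).mp this with ⟨ha, _⟩
        simpa using ha
      rw [List.takeWhile_cons_of_pos hw, wfrom_nil_cons c t h2,
        wfrom_ne t [c] (by simp), wtail_cons_pos c t hw]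
      simp
    · have hw' : wpred c = false := by simpa using hw
      rw [List.takeWhile_cons_of_neg (by simp [hw']), wtail_cons_neg c t hw']
      simp

lemma bFoldr_inv : ∀ (cs : List Char),
    (cs.foldr bStep ([], [])).2 = (cs.takeWhile wpred).reverse ∧
    (cs.foldr bStep ([], [])).1.reverse = wtail cs := by
  intro cs
  induction cs with
  | nil => simp [wfrom, wtail]
  | cons c t ih =>
    obtain ⟨ih2, ih1⟩ := ih
    have ih2' : (List.foldr bStep ([], []) t).2.reverse = t.takeWhile wpred := by
      rw [ih2, List.reverse_reverse]
    have ihE : (List.foldr bStep ([], []) t).2.isEmpty = (t.takeWhile wpred).isEmpty := by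
      rw [ih2, List.isEmpty_reverse]
    simp only [List.foldr_cons]
    by_cases h2 : (c == '_') = true
    · have e : c = '_' := by simpa using h2
      subst e
      have hw : wpred '_' = false := by decide
      rw [bStep, if_pos (by decide)]
      refine ⟨by rw [List.takeWhile_cons_of_neg (by simp [hw]), List.reverse_nil], ?_⟩
      rw [wtail_cons_neg _ t hw, wfrom_nil_underscore t, wfrom_nil_eq t]
      cases hF : (List.foldr bStep ([], []) t).2.isEmpty
      · have ht : (t.takeWhile wpred).isEmpty = false := by rw [← ihE]; exact hF
        simp [ht, ih1, ih2']
      · have ht : (t.takeWhile wpred).isEmpty = true := by rw [← ihE]; exact hF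
        simp [ht, ih1]
    · by_cases hu : PySem.Chars.isupper c = true
      · have hw : wpred c = false := by simp [wpred, hu]
        have hb : bStep c (List.foldr bStep ([], []) t) =
            ((List.foldr bStep ([], []) t).1 ++
              [((List.foldr bStep ([], []) t).2 ++ [c]).reverse], []) := by
          simp [bStep, h2, hu]
        rw [hb]
        refine ⟨by rw [List.takeWhile_cons_of_neg (by simp [hw]), List.reverse_nil], ?_⟩
        rw [wtail_cons_neg c t hw, wfrom_nil_cons c t (by simpa using h2),
          wfrom_ne t [c] (by simp)]
        simp [ih1, ih2']
      · have hw : wpred c = true := by simp [wpred, h2, hu]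
        have hb : bStep c (List.foldr bStep ([], []) t) =
            ((List.foldr bStep ([], []) t).1, (List.foldr bStep ([], []) t).2 ++ [c]) := by
          simp [bStep, h2, hu]
        rw [hb]
        refine ⟨?_, ?_⟩
        · rw [List.takeWhile_cons_of_pos hw, List.reverse_cons, ih2]
        · rw [wtail_cons_pos c t hw]; exact ih1

lemma words_eq (cs : List Char) :
    (if (cs.reverse.foldl (fun s c => bStep c s) ([], [])).2.isEmpty
     then (cs.reverse.foldl (fun s c => bStep c s) ([], [])).1
     else (cs.reverse.foldl (fun s c => bStep c s) ([], [])).1 ++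
          [(cs.reverse.foldl (fun s c => bStep c s) ([], [])).2.reverse]).reverse = wfrom [] cs := by
  have hfr : cs.reverse.foldl (fun s c => bStep c s) ([], ([] : List Char)) =
      cs.foldr bStep ([], []) := by rw [List.foldl_reverse]
  obtain ⟨h2, h1⟩ := bFoldr_inv cs
  have h2' : (cs.foldr bStep ([], [])).2.reverse = cs.takeWhile wpred := by
    rw [h2, List.reverse_reverse]
  have hE : (cs.foldr bStep ([], [])).2.isEmpty = (cs.takeWhile wpred).isEmpty := by
    rw [h2, List.isEmpty_reverse]
  rw [hfr, wfrom_nil_eq cs]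
  cases hF : (cs.foldr bStep ([], [])).2.isEmpty
  · have ht : (cs.takeWhile wpred).isEmpty = false := by rw [← hE]; exact hF
    simp [ht, h1, h2']
  · have ht : (cs.takeWhile wpred).isEmpty = true := by rw [← hE]; exact hF
    simp [ht, h1]

-- ===== VERDICT (by name: the statement is the Claim_ definition above) =====
theorem generate_description_py_spec : Claim_equal_generate_description_py := by
  intro name _
  unfold Spec_generate_description_py generate_description_py generate_description_py_alt
  have hA := aFold_eq name.toList [] []
  unfold finA at hA
  rw [List.nil_append] at hA
  have hB := words_eq name.toList
  simp only [hA, hB]
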